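-- pv_equiv track=rewrite | github.com/Leonelok3/e-shelle | job_agent/views.py | _safe_get_line
-- ===== SOURCE A (Python) =====
-- def _safe_get_line(block: str, prefix: str) -> str:
--     """
--     Cherche une ligne qui commence par 'prefix:' (case-insensitive) et retourne la valeur.
--     Exemple: prefix='URL' récupère 'URL: https://...'
--     """
--     if not block:
--         return ""
--     for line in block.splitlines():
--         line = line.strip()
--         if line.lower().startswith(prefix.lower() + ":"):
--             return line.split(":", 1)[1].strip()
--     return ""
-- ===== SOURCE B (Python) =====
-- def _safe_get_line(block: str, prefix: str) -> str:
--     if not block: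
--         return ""
--     table = {}
--     for line in block.splitlines():
--         line = line.strip()
--         if ":" in line:
--             key, value = line.split(":", 1)
--             table.setdefault(key.lower(), value.strip())
--     return table.get(prefix.lower(), "")
-- ===== Notes on version B (the rewrite author's own statement) =====
-- stated objective: alternative
-- what changed: B makes one pass over the lines building a first-wins key->value dict (split at the first colon, setdefault) and answers with a single dict lookup, instead of A's scan for the first line whose lowered text starts with prefix+':'.
-- outside the precondition, e.g. on _safe_get_line('A:B: c', 'a:b'): A returns 'B: c', B returns ''
import Mathlib
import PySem

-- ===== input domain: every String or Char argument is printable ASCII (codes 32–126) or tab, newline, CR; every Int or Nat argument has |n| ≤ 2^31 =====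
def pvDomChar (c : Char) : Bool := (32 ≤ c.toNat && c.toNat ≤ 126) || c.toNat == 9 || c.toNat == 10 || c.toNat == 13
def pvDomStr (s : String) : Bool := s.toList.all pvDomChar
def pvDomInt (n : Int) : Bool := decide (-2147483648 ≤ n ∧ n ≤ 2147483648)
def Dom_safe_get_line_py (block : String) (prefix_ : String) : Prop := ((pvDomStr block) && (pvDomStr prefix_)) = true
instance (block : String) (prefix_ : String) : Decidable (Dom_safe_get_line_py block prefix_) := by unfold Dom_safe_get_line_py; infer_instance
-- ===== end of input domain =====

-- B builds a first-wins key→value table from the block in one pass and answers by a single dict lookup, instead of A's scan for the first line starting with prefix+':'.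

-- ===== PORT A =====
-- A's for-loop: scan the stripped lines, return the value of the first line whose
-- lowered text starts with prefix.lower() + ":".  (String ops are ported on the
-- code-point list via PySem.Chars, with String.toList/ofList at the boundary.)
def pvA_loop (prefix_ : List Char) : List (List Char) → List Char
  | [] => []
  | l :: rest =>
    let line := PySem.Chars.strip l
    if PySem.Chars.startswith (PySem.Chars.lower line) (PySem.Chars.lower prefix_ ++ [':']) = true then
      -- line.split(":", 1)[1]: the startswith guard guarantees a ':' in line, so index 1 exists
      PySem.Chars.strip ((PySem.List.pyGet? ((PySem.Chars.splitMax? line [':'] 1).getD []) 1).getD [])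
    else pvA_loop prefix_ rest

def safe_get_line_py (block : String) (prefix_ : String) : String :=
  if block = "" then ""
  else String.ofList (pvA_loop prefix_.toList (PySem.Chars.splitlines block.toList))

-- ===== PORT B =====
-- B's loop body: for a stripped line containing ':', split once into key/value and
-- record table.setdefault(key.lower(), value.strip()).
def pvB_step (d : PySem.Dict (List Char) (List Char)) (l : List Char) : PySem.Dict (List Char) (List Char) :=
  let line := PySem.Chars.strip l
  if PySem.Chars.isIn [':'] line = true then
    let parts := (PySem.Chars.splitMax? line [':'] 1).getD []
    d.setdefault (PySem.Chars.lower ((PySem.List.pyGet? parts 0).getD []))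
                 (PySem.Chars.strip ((PySem.List.pyGet? parts 1).getD []))
  else d

def safe_get_line_py_alt (block : String) (prefix_ : String) : String :=
  if block = "" then ""
  else String.ofList
    (((PySem.Chars.splitlines block.toList).foldl pvB_step PySem.Dict.empty).getD
      (PySem.Chars.lower prefix_.toList) [])

-- ===== PRECONDITION & SPEC =====
-- Pre_ excludes prefixes containing ':' — a corner no caller of this field extractor would
-- specify: A then splits the matched line at its FIRST colon and returns a tail that still
-- contains part of the prefix itself, while B's colon-keyed table finds no match.
def Pre_safe_get_line_py (block : String) (prefix_ : String) : Prop :=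
  PySem.Str.isIn ":" prefix_ = false
instance (block : String) (prefix_ : String) : Decidable (Pre_safe_get_line_py block prefix_) := by
  unfold Pre_safe_get_line_py; infer_instance

def pvWitness_safe_get_line_py : String × String := ("Titre: X\nURL: https://e.sh", "url")

def Spec_safe_get_line_py (block : String) (prefix_ : String) (out : String) : Prop := out = safe_get_line_py_alt block prefix_
instance (block : String) (prefix_ : String) (out : String) : Decidable (Spec_safe_get_line_py block prefix_ out) := by unfold Spec_safe_get_line_py; infer_instance

-- ===== CLAIM (what is proved, stated in full; the proofs are below) =====
def Claim_equal_safe_get_line_py : Prop := ∀ (block : String) (prefix_ : String), Dom_safe_get_line_py block prefix_ → Pre_safe_get_line_py block prefix_ → Spec_safe_get_line_py block prefix_ (safe_get_line_py block prefix_)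

-- ===== LEMMAS AND PROOFS =====

theorem pv_ofNat_toNat_mid (m : Nat) (h1 : 97 ≤ m) (h2 : m ≤ 122) : (Char.ofNat m).toNat = m := by
  interval_cases m <;> decide

theorem pv_lowerChar_colon (c : Char) : PySem.Chars.lowerChar c = ':' ↔ c = ':' := by
  unfold PySem.Chars.lowerChar
  split_ifs with hu
  · have h' : 'A' ≤ c ∧ c ≤ 'Z' := by simpa [PySem.Chars.isupper] using hu
    have h1 : 65 ≤ c.toNat ∧ c.toNat ≤ 90 := by
      obtain ⟨ha, hb⟩ := h'
      rw [Char.le_def] at ha hb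
      exact ⟨UInt32.le_iff_toNat_le.mp ha, UInt32.le_iff_toNat_le.mp hb⟩
    constructor
    · intro h
      have h2 := congrArg Char.toNat h
      rw [pv_ofNat_toNat_mid _ (by omega) (by omega)] at h2
      have h3 : (':').toNat = 58 := by decide
      omega
    · intro h
      exfalso
      subst h
      revert h1
      decide
  · simp

theorem pv_match_iff (p : List Char) (hp : ':' ∉ p) (l : List Char) :
    PySem.Chars.startswith (PySem.Chars.lower l) (PySem.Chars.lower p ++ [':']) = true
    ↔ (':' ∈ l ∧ PySem.Chars.lower (l.takeWhile (· ≠ ':')) = PySem.Chars.lower p) := by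
  rw [PySem.Chars.startswith_iff]
  simp only [PySem.Chars.lower]
  induction p generalizing l with
  | nil =>
    cases l with
    | nil => simp
    | cons c r =>
      by_cases hc : c = ':'
      · subst hc
        have hf : PySem.Chars.lowerChar ':' = ':' := by decide
        simp [List.cons_prefix_cons, hf, List.takeWhile_cons]
      · have hf : PySem.Chars.lowerChar c ≠ ':' := fun h => hc ((pv_lowerChar_colon c).mp h)
        simp [List.cons_prefix_cons, List.takeWhile_cons, hc, Ne.symm hf]
  | cons a p' ih =>
    have ha : a ≠ ':' := fun h => hp (h ▸ List.mem_cons_self)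
    have hp' : ':' ∉ p' := fun h => hp (List.mem_cons_of_mem _ h)
    cases l with
    | nil => simp
    | cons c r =>
      simp only [List.map_cons, List.cons_append, List.cons_prefix_cons]
      by_cases hc : c = ':'
      · subst hc
        have hfa : PySem.Chars.lowerChar a ≠ ':' := fun h => ha ((pv_lowerChar_colon a).mp h)
        have hfc : PySem.Chars.lowerChar ':' = ':' := by decide
        rw [hfc]
        constructor
        · rintro ⟨h1, _⟩
          exact absurd h1 hfa
        · rintro ⟨_, h2⟩
          rw [List.takeWhile_cons] at h2
          simp at h2
      · have hmem : (':' ∈ c :: r) ↔ (':' ∈ r) := by simp [Ne.symm hc]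
        have htake : List.takeWhile (fun x => decide (x ≠ ':')) (c :: r) =
            c :: List.takeWhile (fun x => decide (x ≠ ':')) r := by
          simp [List.takeWhile_cons, hc]
        rw [hmem, htake, List.map_cons, ih hp' r]
        constructor
        · rintro ⟨h1, h2, h3⟩
          exact ⟨h2, by rw [h1, h3]⟩
        · rintro ⟨h2, h3⟩
          simp only [List.cons.injEq] at h3
          exact ⟨h3.1.symm, h2, h3.2⟩

theorem pv_go_zero (sep : List Char) (fuel : Nat) (l cur : List Char) (acc : List (List Char)) :
    PySem.Chars.splitOnMax.go sep (fuel + 1) 0 l cur acc = ((cur.reverse ++ l) :: acc).reverse := by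
  cases l <;> simp [PySem.Chars.splitOnMax.go]

theorem pv_go_one (l : List Char) : ∀ (fuel : Nat) (cur : List Char), l.length < fuel →
    PySem.Chars.splitOnMax.go [':'] fuel 1 l cur [] =
      if ':' ∈ l then [cur.reverse ++ l.takeWhile (· ≠ ':'), (l.dropWhile (· ≠ ':')).tail]
      else [cur.reverse ++ l] := by
  induction l with
  | nil =>
    intro fuel cur h
    match fuel, h with
    | fuel + 1, _ => simp [PySem.Chars.splitOnMax.go]
  | cons c r ih =>
    intro fuel cur h
    match fuel, h with
    | fuel + 1, h =>
      have h' : r.length < fuel := Nat.lt_of_succ_lt_succ h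
      by_cases hc : c = ':'
      · subst hc
        have hfuel : 0 < fuel := by omega
        match fuel, hfuel, h' with
        | fuel + 1, _, _ =>
          rw [show PySem.Chars.splitOnMax.go [':'] (fuel + 1 + 1) 1 (':' :: r) cur [] =
              PySem.Chars.splitOnMax.go [':'] (fuel + 1) 0 (List.drop 1 (':' :: r)) [] [cur.reverse] by
            simp [PySem.Chars.splitOnMax.go, List.isPrefixOf]]
          rw [pv_go_zero]
          simp [List.takeWhile_cons, List.dropWhile_cons]
      · rw [show PySem.Chars.splitOnMax.go [':'] (fuel + 1) 1 (c :: r) cur [] =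
            PySem.Chars.splitOnMax.go [':'] fuel 1 r (c :: cur) [] by
          simp [PySem.Chars.splitOnMax.go, List.isPrefixOf, Ne.symm hc]]
        rw [ih fuel (c :: cur) h']
        have hmem : (':' ∈ c :: r) ↔ (':' ∈ r) := by simp [Ne.symm hc]
        by_cases hr : ':' ∈ r
        · simp [hmem, hr, hc, List.takeWhile_cons, List.dropWhile_cons, List.append_assoc]
        · simp [hmem, hr, hc, List.takeWhile_cons, List.dropWhile_cons, List.append_assoc]

theorem pv_split_eq (l : List Char) (h : ':' ∈ l) :
    (PySem.Chars.splitMax? l [':'] 1).getD [] =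
      [l.takeWhile (· ≠ ':'), (l.dropWhile (· ≠ ':')).tail] := by
  rw [PySem.Chars.splitMax?]
  simp only [List.isEmpty_cons, Bool.false_eq_true, if_false, Option.getD_some]
  rw [PySem.Chars.splitOnMax, if_neg (by norm_num), show ((1 : Int)).toNat = 1 from rfl,
    pv_go_one l (l.length + 1) [] (by omega)]
  simp [h]

theorem pv_isIn_colon (l : List Char) : PySem.Chars.isIn [':'] l = true ↔ ':' ∈ l := by
  rw [PySem.Chars.isIn_iff_infix]
  constructor
  · intro h
    exact h.subset (by simp)
  · intro h
    obtain ⟨s, t, rfl⟩ := List.append_of_mem h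
    exact ⟨s, t, by simp⟩

theorem pv_pyGet0 {α : Type} (x y : α) : PySem.List.pyGet? [x, y] (0 : Int) = some x := by
  norm_num [PySem.List.pyGet?, PySem.List.pyIdx?]

theorem pv_pyGet1 {α : Type} (x y : α) : PySem.List.pyGet? [x, y] (1 : Int) = some y := by
  norm_num [PySem.List.pyGet?, PySem.List.pyIdx?]

theorem pv_step_colon (d : PySem.Dict (List Char) (List Char)) (l : List Char)
    (h : ':' ∈ PySem.Chars.strip l) :
    pvB_step d l = d.setdefault
      (PySem.Chars.lower ((PySem.Chars.strip l).takeWhile (· ≠ ':')))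
      (PySem.Chars.strip (((PySem.Chars.strip l).dropWhile (· ≠ ':')).tail)) := by
  simp only [pvB_step]
  rw [if_pos ((pv_isIn_colon _).mpr h), pv_split_eq _ h, pv_pyGet0, pv_pyGet1,
    Option.getD_some, Option.getD_some]

theorem pv_step_nocolon (d : PySem.Dict (List Char) (List Char)) (l : List Char)
    (h : ':' ∉ PySem.Chars.strip l) :
    pvB_step d l = d := by
  simp only [pvB_step]
  rw [if_neg (fun hin => h ((pv_isIn_colon _).mp hin))]

theorem pv_foldl_keep (K v : List Char) :
    ∀ (lines : List (List Char)) (d : PySem.Dict (List Char) (List Char)),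
      d.get? K = some v → (lines.foldl pvB_step d).get? K = some v := by
  intro lines
  induction lines with
  | nil => intro d h; simpa using h
  | cons l r ih =>
    intro d h
    rw [List.foldl_cons]
    apply ih
    by_cases hcolon : ':' ∈ PySem.Chars.strip l
    · rw [pv_step_colon d l hcolon]
      by_cases hk : PySem.Chars.lower ((PySem.Chars.strip l).takeWhile (· ≠ ':')) = K
      · rw [hk, PySem.Dict.get?_setdefault_self, h]
        rfl
      · rw [PySem.Dict.get?_setdefault_of_ne _ _ (Ne.symm hk)]
        exact h
    · rw [pv_step_nocolon d l hcolon]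
      exact h

theorem pv_main (p : List Char) (hp : ':' ∉ p) :
    ∀ (lines : List (List Char)) (d : PySem.Dict (List Char) (List Char)),
      d.get? (PySem.Chars.lower p) = none →
      (lines.foldl pvB_step d).getD (PySem.Chars.lower p) [] = pvA_loop p lines := by
  intro lines
  induction lines with
  | nil =>
    intro d h
    simp [pvA_loop, PySem.Dict.getD, h]
  | cons l r ih =>
    intro d h
    rw [List.foldl_cons]
    simp only [pvA_loop]
    by_cases hcolon : ':' ∈ PySem.Chars.strip l
    · rw [pv_step_colon d l hcolon]
      by_cases hm : PySem.Chars.startswith (PySem.Chars.lower (PySem.Chars.strip l))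
          (PySem.Chars.lower p ++ [':']) = true
      · rw [if_pos hm]
        have hkey := ((pv_match_iff p hp (PySem.Chars.strip l)).mp hm).2
        rw [hkey, PySem.Dict.getD,
          pv_foldl_keep (PySem.Chars.lower p)
            (PySem.Chars.strip (((PySem.Chars.strip l).dropWhile (· ≠ ':')).tail)) r _
            (by rw [PySem.Dict.get?_setdefault_self, h]; rfl),
          Option.getD_some, pv_split_eq _ hcolon, pv_pyGet1, Option.getD_some]
      · rw [if_neg hm]
        have hkey : PySem.Chars.lower ((PySem.Chars.strip l).takeWhile (· ≠ ':')) ≠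
            PySem.Chars.lower p :=
          fun he => hm ((pv_match_iff p hp (PySem.Chars.strip l)).mpr ⟨hcolon, he⟩)
        apply ih
        rw [PySem.Dict.get?_setdefault_of_ne _ _ (Ne.symm hkey)]
        exact h
    · have hm : ¬ PySem.Chars.startswith (PySem.Chars.lower (PySem.Chars.strip l))
          (PySem.Chars.lower p ++ [':']) = true :=
        fun hs => hcolon ((pv_match_iff p hp (PySem.Chars.strip l)).mp hs).1
      rw [if_neg hm, pv_step_nocolon d l hcolon]
      exact ih d h

-- ===== VERDICT (by name: the statement is the Claim_ definition above) =====
theorem safe_get_line_py_spec : Claim_equal_safe_get_line_py := by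
  intro block prefix_ _ hpre
  unfold Spec_safe_get_line_py safe_get_line_py safe_get_line_py_alt
  split_ifs with hb
  · rfl
  · congr 1
    refine (pv_main prefix_.toList ?_ _ PySem.Dict.empty ?_).symm
    · intro hmem
      obtain ⟨s, t, hst⟩ := List.append_of_mem hmem
      have hisin : PySem.Str.isIn ":" prefix_ = true := by
        rw [PySem.Str.isIn_iff_infix]
        exact ⟨s, t, by simp [hst]⟩
      unfold Pre_safe_get_line_py at hpre
      rw [hisin] at hpre
      cases hpre
    · simp [PySem.Dict.get?, PySem.Dict.empty]
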